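-- pv_equiv track=rewrite | github.com/FLAK-ZOSO/Prompt | parsing.py | capitalizePath
-- ===== SOURCE A (Python) =====
-- def capitalizePath(path: str) -> str:
--     path = list(path)
--     path[0] = path[0].upper()
--     for i in range(len(path)):
--         if (path[i] == '\\'):
--             try:
--                 path[i+1] = path[i+1].upper()
--             except IndexError:
--                 break
--     return ''.join(path)
-- ===== SOURCE B (Python) =====
-- def capitalizePath(path: str) -> str:
--     return '\\'.join(seg[:1].upper() + seg[1:] for seg in path.split('\\'))
-- ===== Notes on version B (the rewrite author's own statement) =====
-- stated objective: idiomatic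
-- what changed: Replaces A's in-place list mutation with index peeking and try/except IndexError by a split-on-backslash / capitalize-first-of-each-segment / rejoin pipeline with no explicit loop, index or flag.
import Mathlib
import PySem

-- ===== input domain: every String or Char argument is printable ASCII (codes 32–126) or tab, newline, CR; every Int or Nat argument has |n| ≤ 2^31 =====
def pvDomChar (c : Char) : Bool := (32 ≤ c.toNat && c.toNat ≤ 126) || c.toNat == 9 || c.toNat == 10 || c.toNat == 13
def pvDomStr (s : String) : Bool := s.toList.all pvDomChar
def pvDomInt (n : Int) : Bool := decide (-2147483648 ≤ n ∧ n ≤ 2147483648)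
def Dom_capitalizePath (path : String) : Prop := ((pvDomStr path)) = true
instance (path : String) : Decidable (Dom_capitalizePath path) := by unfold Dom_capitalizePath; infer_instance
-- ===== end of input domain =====

-- B replaces A's in-place index-peeking loop (with its try/except IndexError) by a
-- split-on-backslash / capitalize-first-of-each-segment / rejoin pipeline (objective: idiomatic).

-- ===== PORT A =====
-- one iteration of A's `for i in range(len(path))` body, on the mutated list
def capAstep (acc : List Char) (i : Nat) : List Char :=
  if acc.getD i ' ' = '\\' then        -- path[i] == '\\' (i < len acc always, so getD is exact)
    match acc[i+1]? with
    | some c2 => acc.set (i+1) (PySem.Chars.upperChar c2)   -- path[i+1] = path[i+1].upper()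
    | none => acc    -- IndexError → break; it is the last iteration, so the value is identical
  else acc

def capitalizePath (path : String) : String :=
  match path.toList with
  | [] => ""          -- Python raises IndexError on path[0]; excluded by Pre_
  | c :: rest =>
    let cs := PySem.Chars.upperChar c :: rest             -- path[0] = path[0].upper()
    String.ofList ((List.range cs.length).foldl capAstep cs)  -- for i in range(len(path)): …

-- ===== PORT B =====
-- seg[:1].upper() + seg[1:]
def capUpFirst (seg : List Char) : List Char :=
  PySem.Chars.upper (seg.take 1) ++ seg.drop 1

-- '\\'.join(seg[:1].upper() + seg[1:] for seg in path.split('\\'))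
def capitalizePath_alt (path : String) : String :=
  String.ofList (PySem.Chars.join ['\\'] ((PySem.Chars.splitOn path.toList ['\\']).map capUpFirst))

-- ===== PRECONDITION & SPEC =====
-- Pre_ excludes only the empty string, on which A raises IndexError at path[0].
def Pre_capitalizePath (path : String) : Prop := path ≠ ""
instance (path : String) : Decidable (Pre_capitalizePath path) := by unfold Pre_capitalizePath; infer_instance
def pvWitness_capitalizePath : String := "a\\bc"

def Spec_capitalizePath (path : String) (out : String) : Prop := out = capitalizePath_alt path
instance (path : String) (out : String) : Decidable (Spec_capitalizePath path out) := by unfold Spec_capitalizePath; infer_instance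

-- ===== CLAIM (what is proved, stated in full; the proofs are below) =====
def Claim_equal_capitalizePath : Prop := ∀ (path : String), Dom_capitalizePath path → Pre_capitalizePath path → Spec_capitalizePath path (capitalizePath path)

-- ===== LEMMAS AND PROOFS =====

-- functional description of A's index loop
def goA : List Char → List Char
  | [] => []
  | [c] => [c]
  | c :: d :: cs =>
    if c == '\\' then c :: goA (PySem.Chars.upperChar d :: cs)
    else c :: goA (d :: cs)
termination_by l => l.length

-- A's loop seen as a forward pass with a capitalize-next flag
def goB (cap : Bool) : List Char → List Char
  | [] => []
  | c :: cs => (if cap then PySem.Chars.upperChar c else c) :: goB (c == '\\') cs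

-- recursive characterization of splitOn on the one-char separator '\\'
def splitBS : List Char → List (List Char)
  | [] => [[]]
  | c :: cs =>
    if c == '\\' then [] :: splitBS cs
    else match splitBS cs with
      | [] => [[c]]
      | s :: ss => (c :: s) :: ss

-- the tail segments of the join: each preceded by '\\' and first-capitalized
def capGlue : List (List Char) → List Char
  | [] => []
  | t :: ts => '\\' :: capUpFirst t ++ capGlue ts

theorem upperChar_bs_lit : PySem.Chars.upperChar '\\' = '\\' := by decide

theorem upper_bs (c : Char) : (PySem.Chars.upperChar c == '\\') = (c == '\\') := by
  unfold PySem.Chars.upperChar PySem.Chars.islower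
  by_cases h : ('a' ≤ c ∧ c ≤ 'z')
  · have h1 : 97 ≤ c.toNat := h.1
    have h2 : c.toNat ≤ 122 := h.2
    simp only [h.1, h.2, decide_true, Bool.and_self, if_true]
    have ht : (Char.ofNat (c.toNat - 32)).toNat = c.toNat - 32 := by
      rw [Char.toNat_ofNat]
      have : (c.toNat - 32).isValidChar := by left; omega
      simp [this]
    have hc : (c == '\\') = false := by
      simp only [beq_eq_false_iff_ne, ne_eq]
      intro he; subst he; revert h1; decide
    rw [hc]
    simp only [beq_eq_false_iff_ne, ne_eq]
    intro he
    have hb : (Char.ofNat (c.toNat - 32)).toNat = ('\\' : Char).toNat := by rw [he]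
    rw [ht] at hb
    have : ('\\' : Char).toNat = 92 := by decide
    omega
  · have : (decide ('a' ≤ c) && decide (c ≤ 'z')) = false := by
      rcases not_and_or.mp h with h' | h' <;> simp [h']
    rw [this]; simp

theorem set_append_len (l r : List Char) (x y : Char) :
    (l ++ x :: r).set l.length y = l ++ y :: r := by
  induction l with
  | nil => rfl
  | cons a l ih => simp [ih]

theorem goA_cons_ne (c : Char) (cs : List Char) (h : (c == '\\') = false) :
    goA (c :: cs) = c :: goA cs := by
  cases cs with
  | nil => simp [goA]
  | cons d cs => simp [goA, h]

theorem foldA : ∀ (rest : List Char) (t : Char) (done : List Char),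
    List.foldl capAstep (done ++ t :: rest) (List.range' done.length (t :: rest).length)
      = done ++ goA (t :: rest) := by
  intro rest
  induction rest with
  | nil =>
    intro t done
    have hget : (done ++ [t]).getD done.length ' ' = t := by
      simp [List.getD_eq_getElem?_getD]
    have hpeek : (done ++ [t])[done.length + 1]? = none := by
      apply List.getElem?_eq_none
      simp
    by_cases hbs : t = '\\' <;>
      simp [capAstep, hbs, goA, List.range'_succ]
  | cons d rest' ih =>
    intro t done
    have hget : (done ++ t :: d :: rest').getD done.length ' ' = t := by
      simp [List.getD_eq_getElem?_getD]
    have hpeek : (done ++ t :: d :: rest')[done.length + 1]? = some d := by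
      rw [List.getElem?_append_right (by omega)]
      simp
    rw [show (t :: d :: rest').length = (d :: rest').length + 1 from rfl, List.range'_succ,
      List.foldl_cons]
    by_cases hbs : t = '\\'
    · have hstep : capAstep (done ++ t :: d :: rest') done.length
          = (done ++ [t]) ++ (PySem.Chars.upperChar d :: rest') := by
        unfold capAstep
        rw [hget, hpeek, if_pos hbs]
        show (done ++ t :: d :: rest').set (done.length + 1) (PySem.Chars.upperChar d)
            = (done ++ [t]) ++ (PySem.Chars.upperChar d :: rest')
        rw [show done ++ t :: d :: rest' = (done ++ [t]) ++ d :: rest' by simp,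
          show done.length + 1 = (done ++ [t]).length by simp, set_append_len]
      rw [hstep, show done.length + 1 = (done ++ [t]).length by simp]
      have hih := ih (PySem.Chars.upperChar d) (done ++ [t])
      rw [show (PySem.Chars.upperChar d :: rest').length = (d :: rest').length from rfl] at hih
      rw [hih]
      simp [goA, hbs]
    · have hne : (t == '\\') = false := by simp [hbs]
      have hstep : capAstep (done ++ t :: d :: rest') done.length = (done ++ [t]) ++ d :: rest' := by
        simp [capAstep, hbs]
      rw [hstep, show done.length + 1 = (done ++ [t]).length by simp]
      rw [ih d (done ++ [t])]
      simp [goA_cons_ne t (d :: rest') hne]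

theorem goA_goB (cs : List Char) : ∀ (c : Char), goA (c :: cs) = c :: goB (c == '\\') cs := by
  induction cs with
  | nil => intro c; simp [goA, goB]
  | cons d cs ih =>
    intro c
    by_cases h : (c == '\\') = true
    · simp [goA, h, ih, goB, upper_bs]
    · have h' : (c == '\\') = false := by simpa using h
      simp [goA, h', goB, ih]

theorem upFirst_nil : capUpFirst [] = [] := rfl
theorem upFirst_cons (c : Char) (s : List Char) :
    capUpFirst (c :: s) = PySem.Chars.upperChar c :: s := by
  simp [capUpFirst, PySem.Chars.upper]

-- splitOn with separator '\\' computes splitBS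
theorem splitOn_go_spec : ∀ (fuel : Nat) (l cur : List Char) (acc : List (List Char)),
    l.length ≤ fuel →
    PySem.Chars.splitOn.go ['\\'] fuel l cur acc
      = acc.reverse ++ (match splitBS l with
          | [] => []
          | s :: ss => (cur.reverse ++ s) :: ss) := by
  intro fuel
  induction fuel with
  | zero =>
    intro l cur acc hl
    have : l = [] := List.eq_nil_of_length_eq_zero (Nat.le_zero.mp hl)
    subst this
    simp [PySem.Chars.splitOn.go, splitBS]
  | succ fuel ih =>
    intro l cur acc hl
    cases l with
    | nil => simp [PySem.Chars.splitOn.go, splitBS]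
    | cons c cs =>
      by_cases hc : c = '\\'
      · subst hc
        have hpre : (['\\'] : List Char).isPrefixOf ('\\' :: cs) = true := by
          simp [List.isPrefixOf]
        rw [PySem.Chars.splitOn.go, if_pos hpre,
          show List.drop (['\\'] : List Char).length ('\\' :: cs) = cs from rfl]
        simp only [List.length_cons] at hl
        rw [ih cs [] (cur.reverse :: acc) (by omega)]
        rcases h : splitBS cs with _ | ⟨s, ss⟩
        · exfalso
          induction cs with
          | nil => simp [splitBS] at h
          | cons a as _ =>
            revert h; unfold splitBS
            split
            · simp
            · split <;> simp
        · simp [splitBS, h]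
      · have hpre : (['\\'] : List Char).isPrefixOf (c :: cs) = false := by
          simp only [List.isPrefixOf, Bool.and_eq_false_iff, beq_eq_false_iff_ne, ne_eq]
          exact Or.inl fun h => hc h.symm
        rw [PySem.Chars.splitOn.go, if_neg (by simp [hpre])]
        simp only [List.length_cons] at hl
        rw [ih cs (c :: cur) acc (by omega)]
        rcases h : splitBS cs with _ | ⟨s, ss⟩
        · exfalso
          induction cs with
          | nil => simp [splitBS] at h
          | cons a as _ =>
            revert h; unfold splitBS
            split
            · simp
            · split <;> simp
        · have hcne : (c == '\\') = false := by simp [hc]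
          simp [splitBS, hcne, h]

theorem splitOn_eq_splitBS (l : List Char) :
    PySem.Chars.splitOn l ['\\'] = splitBS l := by
  unfold PySem.Chars.splitOn
  rw [splitOn_go_spec (l.length + 1) l [] [] (by omega)]
  rcases h : splitBS l with _ | ⟨s, ss⟩
  · exfalso
    induction l with
    | nil => simp [splitBS] at h
    | cons a as _ =>
      revert h; unfold splitBS
      split
      · simp
      · split <;> simp
  · simp

-- B's flag pass computes "head segment (capitalized iff cap) ++ glued tail segments"
theorem goB_split : ∀ (l : List Char), ∃ s ss, splitBS l = s :: ss ∧
    goB true l = capUpFirst s ++ capGlue ss ∧ goB false l = s ++ capGlue ss := by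
  intro l
  induction l with
  | nil => exact ⟨[], [], rfl, by simp [goB, capGlue, upFirst_nil], by simp [goB, capGlue]⟩
  | cons c cs ih =>
    rcases ih with ⟨s, ss, hsplit, htrue, hfalse⟩
    by_cases hc : c = '\\'
    · subst hc
      refine ⟨[], s :: ss, by simp [splitBS, hsplit], ?_, ?_⟩
      · show (PySem.Chars.upperChar '\\') :: goB true cs = capUpFirst [] ++ capGlue (s :: ss)
        rw [htrue, upperChar_bs_lit]
        simp [capGlue, upFirst_nil]
      · show '\\' :: goB true cs = [] ++ capGlue (s :: ss)
        rw [htrue]; simp [capGlue]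
    · have hcne : (c == '\\') = false := by simp [hc]
      refine ⟨c :: s, ss, by simp [splitBS, hcne, hsplit], ?_, ?_⟩
      · show (PySem.Chars.upperChar c) :: goB (c == '\\') cs = capUpFirst (c :: s) ++ capGlue ss
        rw [hcne, hfalse, upFirst_cons]; simp
      · show c :: goB (c == '\\') cs = (c :: s) ++ capGlue ss
        rw [hcne, hfalse]; simp

theorem join_glue (ss : List (List Char)) : ∀ (t : List Char),
    PySem.Chars.join ['\\'] (t :: ss.map capUpFirst) = t ++ capGlue ss := by
  induction ss with
  | nil => intro t; simp [PySem.Chars.join_singleton, capGlue]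
  | cons u us ih =>
    intro t
    rw [List.map_cons, PySem.Chars.join_cons_cons, ih (capUpFirst u)]
    simp [capGlue]

-- ===== VERDICT (by name: the statement is the Claim_ definition above) =====
theorem capitalizePath_spec : Claim_equal_capitalizePath := by
  intro path _ _
  unfold Spec_capitalizePath capitalizePath capitalizePath_alt
  cases hp : path.toList with
  | nil => rfl
  | cons c rest =>
    simp only
    rw [List.range_eq_range']
    have hA := foldA rest (PySem.Chars.upperChar c) []
    simp only [List.length_nil, List.nil_append] at hA
    rw [hA, goA_goB rest (PySem.Chars.upperChar c), upper_bs, splitOn_eq_splitBS]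
    rcases goB_split rest with ⟨s, ss, hsplit, htrue, hfalse⟩
    by_cases hc : c = '\\'
    · subst hc
      rw [show splitBS ('\\' :: rest) = [] :: s :: ss by simp [splitBS, hsplit]]
      rw [List.map_cons, List.map_cons, PySem.Chars.join_cons_cons, join_glue ss (capUpFirst s)]
      rw [show (('\\' : Char) == '\\') = true from rfl, htrue, upperChar_bs_lit]
      simp [upFirst_nil]
    · have hcne : (c == '\\') = false := by simp [hc]
      rw [show splitBS (c :: rest) = (c :: s) :: ss by simp [splitBS, hcne, hsplit]]
      rw [List.map_cons, join_glue ss (capUpFirst (c :: s)), upFirst_cons]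
      rw [hcne, hfalse]
      simp
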